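-- pv_equiv track=rewrite | github.com/BrianMills2718/process_tracing | core/streaming_html.py | filter_causal_chains_intelligently
-- ===== SOURCE A (Python) =====
-- from typing import Generator, Dict, Any, Optional, List, Union
--
-- def filter_causal_chains_intelligently(chains: List, max_chains: int = 50) -> List:
--     """Filter and prioritize causal chains for optimal user experience"""
--     if len(chains) <= max_chains:
--         return chains
--
--     # Group by length for diversity
--     by_length = {}
--     for chain in chains:
--         path_length = len(chain.get('path_descriptions', chain.get('path', [])))
--         if path_length not in by_length:
--             by_length[path_length] = []
--         by_length[path_length].append(chain)
--
--     # Select diverse chains across length groups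
--     filtered = []
--     lengths_desc = sorted(by_length.keys(), reverse=True)
--
--     # Take top chains from each length group
--     chains_per_group = max(3, max_chains // len(lengths_desc)) if lengths_desc else 5
--
--     for length in lengths_desc:
--         group_chains = by_length[length][:chains_per_group]
--         filtered.extend(group_chains)
--         if len(filtered) >= max_chains:
--             break
--
--     return filtered[:max_chains]
-- ===== SOURCE B (Python) =====
-- def filter_causal_chains_intelligently(chains, max_chains=50):
--     """Filter and prioritize causal chains for optimal user experience"""
--     if not chains or len(chains) <= max_chains:
--         return chains
--
--     def length_key(chain):
--         return len(chain.get('path_descriptions', chain.get('path', [])))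
--
--     # Stable sort descending by length: equal-length chains keep original order,
--     # so walking the sorted list group by group replaces the dict grouping.
--     ordered = sorted(chains, key=length_key, reverse=True)
--     chains_per_group = max(3, max_chains // len({length_key(c) for c in chains}))
--
--     result = []
--     current = None
--     taken = 0
--     for chain in ordered:
--         k = length_key(chain)
--         if k != current:
--             # a group just ended: stop if we already have enough
--             if current is not None and len(result) >= max_chains:
--                 break
--             current, taken = k, 0
--         if taken < chains_per_group:
--             result.append(chain)
--             taken += 1
--     return result[:max_chains]
-- ===== Notes on version B (the rewrite author's own statement) =====
-- stated objective: alternative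
-- what changed: Replaces the dict-of-length-groups plus sorted-keys loop by one stable descending sort of the chains themselves followed by a single groupby-style scan with a per-group counter; the distinct-length count comes from a set instead of the dict's keys.
import Mathlib
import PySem

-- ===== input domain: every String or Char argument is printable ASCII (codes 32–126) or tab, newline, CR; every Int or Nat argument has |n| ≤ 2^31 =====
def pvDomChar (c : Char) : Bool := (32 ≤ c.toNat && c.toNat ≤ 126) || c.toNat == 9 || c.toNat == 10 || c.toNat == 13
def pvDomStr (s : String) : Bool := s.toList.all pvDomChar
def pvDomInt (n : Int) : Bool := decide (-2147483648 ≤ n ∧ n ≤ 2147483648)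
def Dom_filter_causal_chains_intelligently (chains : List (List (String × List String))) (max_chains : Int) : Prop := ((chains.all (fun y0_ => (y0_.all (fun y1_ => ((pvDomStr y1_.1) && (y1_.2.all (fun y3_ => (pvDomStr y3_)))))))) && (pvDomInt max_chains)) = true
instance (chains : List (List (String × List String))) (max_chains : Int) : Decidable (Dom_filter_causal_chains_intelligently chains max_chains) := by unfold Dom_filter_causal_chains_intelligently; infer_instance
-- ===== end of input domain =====

-- B replaces A's dict-of-length-groups and per-key loop by one stable descending
-- sort plus a single groupby-style scan (objective: alternative algorithm, same cost class).

-- ===== PORT A =====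
-- len(chain.get('path_descriptions', chain.get('path', []))) — shared by both Pythons verbatim
def pvChainLen (chain : List (String × List String)) : Int :=
  ((((PySem.Dict.mk chain).get? "path_descriptions").getD
      (((PySem.Dict.mk chain).get? "path").getD [])).length : Int)

-- A's 'for length in lengths_desc' loop with its break
def pvLoopA (d : PySem.Dict Int (List (List (String × List String)))) (per mx : Int) :
    List Int → List (List (String × List String)) → List (List (String × List String))
  | [], filtered => filtered
  | l :: rest, filtered =>
    let group_chains := PySem.List.slice (d.getD l []) none (some per)
    let filtered := filtered ++ group_chains
    if mx ≤ (filtered.length : Int) then filtered else pvLoopA d per mx rest filtered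

def filter_causal_chains_intelligently (chains : List (List (String × List String))) (max_chains : Int) : List (List (String × List String)) :=
  if (chains.length : Int) ≤ max_chains then chains
  else
    let by_length := chains.foldl (fun d chain =>
      let pl := pvChainLen chain
      let d := if d.contains pl then d else d.insert pl []
      d.insert pl (d.getD pl [] ++ [chain])) PySem.Dict.empty
    let lengths_desc := PySem.List.sorted by_length.keys (fun x => x) true
    let chains_per_group : Int :=
      if lengths_desc.isEmpty then 5
      else max 3 (PySem.Int.floordiv max_chains (lengths_desc.length : Int))
    let filtered := pvLoopA by_length chains_per_group max_chains lengths_desc []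
    PySem.List.slice filtered none (some max_chains)

-- ===== PORT B =====
-- B's single scan over the sorted list: current group key, count taken in the group
def pvLoopB (per mx : Int) :
    List (List (String × List String)) → Option Int → Int → List (List (String × List String)) → List (List (String × List String))
  | [], _, _, result => result
  | chain :: rest, current, taken, result =>
    let k := pvChainLen chain
    if some k ≠ current ∧ (current ≠ none ∧ mx ≤ (result.length : Int)) then result
    else
      let st := if some k ≠ current then ((some k : Option Int), (0 : Int)) else (current, taken)
      if st.2 < per then pvLoopB per mx rest st.1 (st.2 + 1) (result ++ [chain])
      else pvLoopB per mx rest st.1 st.2 result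

def filter_causal_chains_intelligently_alt (chains : List (List (String × List String))) (max_chains : Int) : List (List (String × List String)) :=
  if chains.isEmpty ∨ (chains.length : Int) ≤ max_chains then chains
  else
    let ordered := PySem.List.sorted chains pvChainLen true
    let chains_per_group : Int :=
      max 3 (PySem.Int.floordiv max_chains ((PySem.Set.ofList (chains.map pvChainLen)).length : Int))
    PySem.List.slice (pvLoopB chains_per_group max_chains ordered none 0 []) none (some max_chains)

-- ===== PRECONDITION & SPEC =====
def Spec_filter_causal_chains_intelligently (chains : List (List (String × List String))) (max_chains : Int) (out : List (List (String × List String))) : Prop := out = filter_causal_chains_intelligently_alt chains max_chains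
instance (chains : List (List (String × List String))) (max_chains : Int) (out : List (List (String × List String))) : Decidable (Spec_filter_causal_chains_intelligently chains max_chains out) := by unfold Spec_filter_causal_chains_intelligently; infer_instance

-- ===== CLAIM (what is proved, stated in full; the proofs are below) =====
def Claim_equal_filter_causal_chains_intelligently : Prop := ∀ (chains : List (List (String × List String))) (max_chains : Int), Dom_filter_causal_chains_intelligently chains max_chains → Spec_filter_causal_chains_intelligently chains max_chains (filter_causal_chains_intelligently chains max_chains)

-- ===== LEMMAS AND PROOFS =====

theorem pv_insertBy_skip {α : Type} (bef : α → α → Bool) (x : α) (g rest : List α)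
    (h : ∀ y ∈ g, bef x y = false) :
    PySem.List.insertBy bef x (g ++ rest) = g ++ PySem.List.insertBy bef x rest := by
  induction g with
  | nil => simp
  | cons y g ih =>
    have hy : bef x y = false := h y (by simp)
    have hr : ∀ z ∈ g, bef x z = false := fun z hz => h z (by simp [hz])
    simp [PySem.List.insertBy, hy, ih hr]

theorem pv_insertBy_front {α : Type} (bef : α → α → Bool) (x : α) (rest : List α)
    (h : ∀ y ∈ rest, bef x y = true) :
    PySem.List.insertBy bef x rest = x :: rest := by
  cases rest with
  | nil => rfl
  | cons y t => simp [PySem.List.insertBy, h y (by simp)]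

theorem pv_flatMap_congr {α β : Type} (L : List α) (f g : α → List β)
    (h : ∀ a ∈ L, f a = g a) : L.flatMap f = L.flatMap g := by
  induction L with
  | nil => rfl
  | cons a L ih =>
    simp only [List.flatMap_cons, h a (by simp), ih (fun b hb => h b (by simp [hb]))]

def pvInsDesc (k : Int) : List Int → List Int
  | [] => [k]
  | l :: L => if l < k then k :: l :: L else if k = l then l :: L else l :: pvInsDesc k L

theorem pv_mem_insDesc (k : Int) (L : List Int) (a : Int) :
    a ∈ pvInsDesc k L ↔ a = k ∨ a ∈ L := by
  induction L with
  | nil => simp [pvInsDesc]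
  | cons l L ih =>
    simp only [pvInsDesc]
    split_ifs with h1 h2
    · simp
    · subst h2; simp
    · simp [ih]; tauto

theorem pv_insDesc_pairwise (k : Int) (L : List Int)
    (h : L.Pairwise (fun a b => b < a)) : (pvInsDesc k L).Pairwise (fun a b => b < a) := by
  induction L with
  | nil => simp [pvInsDesc]
  | cons l L ih =>
    rw [List.pairwise_cons] at h
    simp only [pvInsDesc]
    split_ifs with h1 h2
    · refine List.pairwise_cons.2 ⟨?_, List.pairwise_cons.2 ⟨h.1, h.2⟩⟩
      intro y hy
      rcases List.mem_cons.1 hy with rfl | hy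
      · exact h1
      · exact lt_trans (h.1 y hy) h1
    · exact List.pairwise_cons.2 ⟨h.1, h.2⟩
    · refine List.pairwise_cons.2 ⟨?_, ih h.2⟩
      intro y hy
      rcases (pv_mem_insDesc k L y).1 hy with rfl | hy
      · omega
      · exact h.1 y hy

theorem pv_insDesc_of_mem (k : Int) (L : List Int) (hk : k ∈ L)
    (h : L.Pairwise (fun a b => b < a)) : pvInsDesc k L = L := by
  induction L with
  | nil => simp at hk
  | cons l L ih =>
    rw [List.pairwise_cons] at h
    rcases List.mem_cons.1 hk with rfl | hk'
    · simp [pvInsDesc]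
    · have hkl : k < l := h.1 k hk'
      simp only [pvInsDesc]
      rw [if_neg (by omega), if_neg (by omega), ih hk' h.2]

theorem pv_insDesc_perm (k : Int) (L : List Int) (hk : k ∉ L) :
    (pvInsDesc k L).Perm (L ++ [k]) := by
  induction L with
  | nil => simp [pvInsDesc]
  | cons l L ih =>
    have hne : k ≠ l := fun e => hk (by simp [e])
    have hk' : k ∉ L := fun e => hk (by simp [e])
    simp only [pvInsDesc]
    split_ifs with h1
    · exact (List.perm_append_singleton k (l :: L)).symm
    · exact List.Perm.cons l (ih hk')

theorem pv_insert_groups {C : Type} (key : C → Int) (x : C) (k : Int) (hx : key x = k)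
    (L : List Int) (F : Int → List C)
    (Hgrp : ∀ l ∈ L, ∀ y ∈ F l, key y = l) (HF : ∀ l ∈ L, F l ≠ [])
    (Hdesc : L.Pairwise (fun a b => b < a)) (Hk : k ∉ L → F k = []) :
    PySem.List.insertBy (fun a b => decide (key b < key a)) x (L.flatMap F)
      = (pvInsDesc k L).flatMap (fun l => F l ++ if k == l then [x] else []) := by
  induction L with
  | nil =>
    simp [pvInsDesc, PySem.List.insertBy, Hk (by simp)]
  | cons l L ih =>
    rw [List.pairwise_cons] at Hdesc
    have hcongr : ∀ (M : List Int), k ∉ M → (∀ l' ∈ M, l' ∈ l :: L) →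
        M.flatMap (fun l' => F l' ++ if k == l' then [x] else []) = M.flatMap F := by
      intro M hkM _
      refine pv_flatMap_congr _ _ _ (fun a ha => ?_)
      have : (k == a) = false := beq_eq_false_iff_ne.2 (fun e => hkM (e ▸ ha))
      simp [this]
    rcases lt_trichotomy l k with hlt | heq | hgt
    · -- l < k : x lands in front of every group
      have hk_notin : k ∉ l :: L := by
        intro hm
        rcases List.mem_cons.1 hm with rfl | hm
        · omega
        · have := Hdesc.1 k hm; omega
      have hall : ∀ y ∈ (l :: L).flatMap F, (fun a b => decide (key b < key a)) x y = true := by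
        intro y hy
        rcases List.mem_flatMap.1 hy with ⟨l', hl', hyF⟩
        have hkey := Hgrp l' hl' y hyF
        have hle : l' ≤ l := by
          rcases List.mem_cons.1 hl' with rfl | h
          · exact le_refl _
          · exact le_of_lt (Hdesc.1 l' h)
        simp only [decide_eq_true_eq, hkey, hx]; omega
      rw [pv_insertBy_front _ _ _ hall]
      have hins : pvInsDesc k (l :: L) = k :: l :: L := by simp [pvInsDesc, hlt]
      rw [hins]
      simp only [List.flatMap_cons]
      have h2 := hcongr L (fun hm => hk_notin (by simp [hm])) (fun a ha => by simp [ha])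
      have hkl : (k == l) = false := beq_eq_false_iff_ne.2 (by omega)
      rw [Hk hk_notin, hkl, h2]
      simp
    · -- l = k : x appended at the end of group l
      subst heq
      have hkL : l ∉ L := fun hm => absurd (Hdesc.1 l hm) (lt_irrefl l)
      have hskip : ∀ y ∈ F l, (fun a b => decide (key b < key a)) x y = false := by
        intro y hy
        have := Hgrp l (by simp) y hy
        simp [this, hx]
      rw [List.flatMap_cons, pv_insertBy_skip _ _ _ _ hskip]
      have hall : ∀ y ∈ L.flatMap F, (fun a b => decide (key b < key a)) x y = true := by
        intro y hy
        rcases List.mem_flatMap.1 hy with ⟨l', hl', hyF⟩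
        have hkey := Hgrp l' (by simp [hl']) y hyF
        have := Hdesc.1 l' hl'
        simp only [decide_eq_true_eq, hkey, hx]; omega
      rw [pv_insertBy_front _ _ _ hall]
      have hins : pvInsDesc l (l :: L) = l :: L := by simp [pvInsDesc]
      rw [hins]
      simp only [List.flatMap_cons]
      have h2 := hcongr L hkL (fun a ha => by simp [ha])
      rw [h2]
      simp
    · -- k < l : recurse into the tail
      have hne : k ≠ l := by omega
      have hskip : ∀ y ∈ F l, (fun a b => decide (key b < key a)) x y = false := by
        intro y hy
        have := Hgrp l (by simp) y hy
        simp only [decide_eq_false_iff_not, this, hx]; omega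
      rw [List.flatMap_cons, pv_insertBy_skip _ _ _ _ hskip]
      have hins : pvInsDesc k (l :: L) = l :: pvInsDesc k L := by
        simp only [pvInsDesc]
        rw [if_neg (by omega), if_neg hne]
      rw [hins]
      simp only [List.flatMap_cons]
      have hIH := ih (fun l' hl' => Hgrp l' (by simp [hl'])) (fun l' hl' => HF l' (by simp [hl']))
        Hdesc.2 (fun hkL => Hk (fun hm => by rcases List.mem_cons.1 hm with rfl | hm; exact hne rfl; exact hkL hm))
      rw [hIH]
      have hkl : (k == l) = false := beq_eq_false_iff_ne.2 hne
      rw [hkl]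
      simp

theorem pv_set_append_singleton {α : Type} [BEq α] (ys : List α) (a : α) :
    PySem.Set.ofList (ys ++ [a]) = PySem.Set.add (PySem.Set.ofList ys) a := by
  rw [PySem.Set.ofList_eq_foldl, List.foldl_append, ← PySem.Set.ofList_eq_foldl]
  rfl

theorem pv_sorted_groups {C : Type} (key : C → Int) (xs : List C) :
    PySem.List.sorted xs key true
      = (PySem.List.sorted (PySem.Set.ofList (xs.map key)) (fun x => x) true).flatMap
          (fun l => xs.filter (fun c => key c == l)) := by
  induction xs using List.reverseRecOn with
  | nil => rfl
  | append_singleton xs x ih =>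
    set S := PySem.Set.ofList (xs.map key) with hS
    set L := PySem.List.sorted S (fun x => x) true with hL
    have hperm : L.Perm S := PySem.List.sorted_perm S (fun x => x) true
    have hnodup : L.Nodup := hperm.nodup_iff.2 (PySem.Set.nodup_ofList _)
    have hle : L.Pairwise (fun a b => b ≤ a) := PySem.List.sorted_pairwise_rev S (fun x => x)
    have hdesc : L.Pairwise (fun a b => b < a) :=
      List.Pairwise.imp₂ (fun a b h1 h2 => lt_of_le_of_ne h1 (Ne.symm h2)) hle hnodup
    have hmemL : ∀ l, l ∈ L ↔ l ∈ xs.map key := by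
      intro l
      rw [PySem.List.mem_sorted, hS, PySem.Set.mem_ofList]
    -- left side: sorted (xs ++ [x]) is insertBy into sorted xs
    have hstep : PySem.List.sorted (xs ++ [x]) key true
        = PySem.List.insertBy (fun a b => decide (key b < key a)) x (PySem.List.sorted xs key true) := by
      rw [PySem.List.sorted_rev_eq_foldl_insertBy, List.foldl_append,
        ← PySem.List.sorted_rev_eq_foldl_insertBy]
      rfl
    rw [hstep, ih]
    have hins := pv_insert_groups key x (key x) rfl L (fun l => xs.filter (fun c => key c == l))
      (fun l _ y hy => by
        have := (List.mem_filter.1 hy).2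
        exact beq_iff_eq.1 this)
      (fun l hl => by
        rcases List.mem_map.1 ((hmemL l).1 hl) with ⟨c, hc, rfl⟩
        exact List.ne_nil_of_mem (List.mem_filter.2 ⟨hc, beq_self_eq_true _⟩))
      hdesc
      (fun hk => by
        rw [List.filter_eq_nil_iff]
        intro c hc hbeq
        exact hk ((hmemL (key x)).2 (beq_iff_eq.1 hbeq ▸ List.mem_map_of_mem hc)))
    rw [hins]
    -- right side: the new key set is S.add (key x), its sorted form is pvInsDesc
    have hset : PySem.Set.ofList ((xs ++ [x]).map key) = PySem.Set.add S (key x) := by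
      rw [List.map_append, List.map_singleton, pv_set_append_singleton, hS]
    have hsorted' : PySem.List.sorted (PySem.Set.add S (key x)) (fun x => x) true
        = pvInsDesc (key x) L := by
      by_cases hm : key x ∈ L
      · rw [PySem.Set.add_of_mem (hperm.subset hm), ← hL, pv_insDesc_of_mem _ _ hm hdesc]
      · have hmS : key x ∉ S := fun h => hm (hperm.mem_iff.2 h)
        have hadd : PySem.Set.add S (key x) = S ++ [key x] := by
          rw [PySem.Set.add]
          rw [if_neg (by simpa [PySem.Set.contains, List.contains_iff_mem] using hmS)]
        rw [hadd]
        refine PySem.List.sorted_rev_eq_of_perm_of_pairwise_gt _ _ _ ?_ ?_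
        · exact (pv_insDesc_perm _ _ hm).trans (hperm.append_right [key x])
        · exact pv_insDesc_pairwise _ _ hdesc
    rw [hset, hsorted']
    refine pv_flatMap_congr _ _ _ (fun l _ => ?_)
    rw [List.filter_append, List.filter_singleton]
    cases h : (key x == l) <;> simp_all

-- A's dict-building step is Dict.modify
theorem pv_body_eq_modify (d : PySem.Dict Int (List (List (String × List String))))
    (c : List (String × List String)) :
    (let pl := pvChainLen c
     let d1 := if d.contains pl then d else d.insert pl []
     d1.insert pl (d1.getD pl [] ++ [c]))
      = d.modify (pvChainLen c) [] (· ++ [c]) := by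
  unfold PySem.Dict.modify
  dsimp only
  by_cases h : d.contains (pvChainLen c) = true
  · rw [if_pos h]
  · rw [if_neg h, PySem.Dict.getD_insert_self, PySem.Dict.insert_insert_self,
      PySem.Dict.getD_of_not_contains d [] (by simpa using h)]

theorem pv_foldl_keyed (f : List (String × List String) → Int)
    (l : List (List (String × List String)))
    (d : PySem.Dict Int (List (List (String × List String)))) :
    l.foldl (fun d c => d.modify (f c) [] (· ++ [c])) d
      = (l.map (fun c => (f c, c))).foldl (fun d p => d.modify p.1 [] (· ++ [p.2])) d := by
  induction l generalizing d with
  | nil => rfl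
  | cons c l ih => simp only [List.map_cons, List.foldl_cons, ih]

theorem pv_byLength_getD (chains : List (List (String × List String))) (l : Int) :
    ((chains.foldl (fun d chain =>
        let pl := pvChainLen chain
        let d := if d.contains pl then d else d.insert pl []
        d.insert pl (d.getD pl [] ++ [chain])) PySem.Dict.empty).getD l [])
      = chains.filter (fun c => pvChainLen c == l) := by
  have hcongr := PySem.List.foldl_congr_mem
    (l := chains) (init := (PySem.Dict.empty : PySem.Dict Int (List (List (String × List String)))))
    (f := fun d chain =>
      let pl := pvChainLen chain
      let d := if d.contains pl then d else d.insert pl []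
      d.insert pl (d.getD pl [] ++ [chain]))
    (g := fun d c => d.modify (pvChainLen c) [] (· ++ [c]))
    (fun acc x _ => pv_body_eq_modify acc x)
  rw [hcongr]
  rw [pv_foldl_keyed pvChainLen chains PySem.Dict.empty]
  rw [PySem.Dict.getD_foldl_modify_append]
  rw [List.filter_map, List.map_map]
  simp [Function.comp_def]

theorem pv_byLength_keys (chains : List (List (String × List String))) :
    (chains.foldl (fun d chain =>
        let pl := pvChainLen chain
        let d := if d.contains pl then d else d.insert pl []
        d.insert pl (d.getD pl [] ++ [chain])) PySem.Dict.empty).keys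
      = PySem.Set.ofList (chains.map pvChainLen) := by
  have hcongr := PySem.List.foldl_congr_mem
    (l := chains) (init := (PySem.Dict.empty : PySem.Dict Int (List (List (String × List String)))))
    (f := fun d chain =>
      let pl := pvChainLen chain
      let d := if d.contains pl then d else d.insert pl []
      d.insert pl (d.getD pl [] ++ [chain]))
    (g := fun d c => d.modify (pvChainLen c) [] (· ++ [c]))
    (fun acc x _ => pv_body_eq_modify acc x)
  rw [hcongr]
  rw [PySem.Dict.keys_foldl_modify_key chains pvChainLen [] (fun _ c => (· ++ [c]))]
  simpa using PySem.Set.update_empty (chains.map pvChainLen)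

-- B's scan through the inside of one group
theorem pv_group_scan (per mx l : Int) :
    ∀ (g : List (List (String × List String))), (∀ y ∈ g, pvChainLen y = l) →
    ∀ (cs : List (List (String × List String))) (t : Int) (res : List (List (String × List String))),
    ∃ t', pvLoopB per mx (g ++ cs) (some l) t res
      = pvLoopB per mx cs (some l) t' (res ++ g.take (per - t).toNat) := by
  intro g
  induction g with
  | nil => exact fun _ cs t res => ⟨t, by simp⟩
  | cons y g ih =>
    intro hg cs t res
    have hy : pvChainLen y = l := hg y (by simp)
    have hg' : ∀ z ∈ g, pvChainLen z = l := fun z hz => hg z (by simp [hz])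
    rw [List.cons_append]
    by_cases ht : t < per
    · have hstep : pvLoopB per mx (y :: (g ++ cs)) (some l) t res
          = pvLoopB per mx (g ++ cs) (some l) (t + 1) (res ++ [y]) := by
        simp [pvLoopB, hy, ht]
      obtain ⟨t', he⟩ := ih hg' cs (t + 1) (res ++ [y])
      refine ⟨t', (hstep.trans he).trans ?_⟩
      have harith : (per - t).toNat = (per - (t + 1)).toNat + 1 := by omega
      rw [harith, List.take_succ_cons]
      simp
    · have hstep : pvLoopB per mx (y :: (g ++ cs)) (some l) t res
          = pvLoopB per mx (g ++ cs) (some l) t res := by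
        simp [pvLoopB, hy, ht]
      obtain ⟨t', he⟩ := ih hg' cs t res
      refine ⟨t', (hstep.trans he).trans ?_⟩
      have harith : (per - t).toNat = 0 := by omega
      simp [harith]

-- B's scan over the concatenated groups equals A's loop over the group keys
theorem pv_loop_eq (per mx : Int) (hper : 0 < per)
    (F : Int → List (List (String × List String)))
    (d : PySem.Dict Int (List (List (String × List String)))) :
    ∀ (L : List Int) (cur : Option Int) (t : Int) (res : List (List (String × List String))),
    (∀ l ∈ L, ∀ y ∈ F l, pvChainLen y = l) → (∀ l ∈ L, F l ≠ []) →
    (∀ l ∈ L, d.getD l [] = F l) → (∀ l ∈ L, cur ≠ some l) → L.Pairwise (· ≠ ·) →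
    pvLoopB per mx (L.flatMap F) cur t res
      = if cur ≠ none ∧ mx ≤ (res.length : Int) then res else pvLoopA d per mx L res := by
  intro L
  induction L with
  | nil =>
    intro cur t res _ _ _ _ _
    simp only [List.flatMap_nil, pvLoopB, pvLoopA]
    split <;> rfl
  | cons l L ih =>
    intro cur t res h1 h2 h3 h4 h5
    rw [List.pairwise_cons] at h5
    cases hFl : F l with
    | nil => exact absurd hFl (h2 l (by simp))
    | cons c g =>
      have hc : pvChainLen c = l := h1 l (by simp) c (by rw [hFl]; simp)
      have hgl : ∀ y ∈ g, pvChainLen y = l := fun y hy => h1 l (by simp) y (by rw [hFl]; simp [hy])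
      have hcur : some l ≠ cur := fun e => h4 l (by simp) e.symm
      simp only [List.flatMap_cons, hFl, List.cons_append]
      simp only [pvLoopB, hc]
      by_cases hstop : cur ≠ none ∧ mx ≤ (res.length : Int)
      · rw [if_pos ⟨hcur, hstop⟩, if_pos hstop]
      · rw [if_neg (fun hh => hstop hh.2), if_pos hcur, if_pos (by simpa using hper)]
        obtain ⟨t', he⟩ := pv_group_scan per mx l g hgl (L.flatMap F) (0 + 1) (res ++ [c])
        rw [he]
        have hih := ih (some l) t' (res ++ [c] ++ g.take (per - (0 + 1)).toNat)
          (fun l' hl' => h1 l' (by simp [hl'])) (fun l' hl' => h2 l' (by simp [hl']))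
          (fun l' hl' => h3 l' (by simp [hl']))
          (fun l' hl' e => h5.1 l' hl' (Option.some.inj e))
          h5.2
        rw [hih, if_neg hstop]
        simp only [pvLoopA]
        rw [h3 l (by simp), hFl, PySem.List.slice_to _ (le_of_lt hper)]
        have htn : per.toNat = (per - (0 + 1)).toNat + 1 := by omega
        rw [htn, List.take_succ_cons]
        simp only [ne_eq, reduceCtorEq, not_false_eq_true, true_and, List.append_assoc,
          List.cons_append, List.nil_append]

theorem pv_slice_nil (mx : Int) :
    PySem.List.slice ([] : List (List (String × List String))) none (some mx) = [] := by
  simp [PySem.List.slice]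

-- the main equality on nonempty, not-early-returning input
theorem pv_main (chains : List (List (String × List String))) (mx : Int)
    (h1 : ¬ (chains.length : Int) ≤ mx) (h0 : chains ≠ []) :
    filter_causal_chains_intelligently chains mx = filter_causal_chains_intelligently_alt chains mx := by
  unfold filter_causal_chains_intelligently filter_causal_chains_intelligently_alt
  rw [if_neg h1, if_neg (by simp [h0, h1])]
  dsimp only
  rw [pv_byLength_keys]
  set F : Int → List (List (String × List String)) :=
    fun l => chains.filter (fun c => pvChainLen c == l) with hF
  set S := PySem.Set.ofList (chains.map pvChainLen) with hS
  set L := PySem.List.sorted S (fun x => x) true with hL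
  set D := chains.foldl (fun d chain =>
      let pl := pvChainLen chain
      let d := if d.contains pl then d else d.insert pl []
      d.insert pl (d.getD pl [] ++ [chain])) PySem.Dict.empty with hD
  have hSne : S ≠ [] := by
    cases chains with
    | nil => exact absurd rfl h0
    | cons c0 rest =>
      have : pvChainLen c0 ∈ S := (PySem.Set.mem_ofList _ _).2 (by simp)
      exact List.ne_nil_of_mem this
  have hLne : L ≠ [] := fun e => hSne ((PySem.List.sorted_eq_nil_iff _ _ _).1 e)
  rw [if_neg (by simpa using hLne)]
  have hlen : (L.length : Int) = (S.length : Int) := by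
    rw [hL, PySem.List.length_sorted]
  rw [hlen]
  set per := max 3 (PySem.Int.floordiv mx (S.length : Int)) with hper
  have hper0 : 0 < per := by
    have := le_max_left (3 : Int) (PySem.Int.floordiv mx (S.length : Int))
    omega
  rw [pv_sorted_groups pvChainLen chains, ← hS, ← hL]
  have hnodup : L.Nodup :=
    (PySem.List.sorted_perm S (fun x => x) true).nodup_iff.2 (PySem.Set.nodup_ofList _)
  have hloop := pv_loop_eq per mx hper0 F D L none 0 []
    (fun l _ y hy => beq_iff_eq.1 (List.mem_filter.1 hy).2)
    (fun l hl => by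
      rcases List.mem_map.1 ((PySem.Set.mem_ofList _ _).1
        ((PySem.List.mem_sorted _ _ _ _).1 hl)) with ⟨c, hc, rfl⟩
      exact List.ne_nil_of_mem (List.mem_filter.2 ⟨hc, beq_self_eq_true _⟩))
    (fun l _ => pv_byLength_getD chains l)
    (fun l _ e => by simp at e)
    hnodup
  rw [hloop, if_neg (by simp)]

-- ===== VERDICT (by name: the statement is the Claim_ definition above) =====
theorem filter_causal_chains_intelligently_spec : Claim_equal_filter_causal_chains_intelligently := by
  intro chains max_chains _
  unfold Spec_filter_causal_chains_intelligently
  by_cases h1 : (chains.length : Int) ≤ max_chains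
  · unfold filter_causal_chains_intelligently filter_causal_chains_intelligently_alt
    rw [if_pos h1, if_pos (Or.inr h1)]
  · by_cases h0 : chains = []
    · subst h0
      unfold filter_causal_chains_intelligently filter_causal_chains_intelligently_alt
      rw [if_neg h1, if_pos (Or.inl (by simp))]
      dsimp only
      rw [pv_byLength_keys]
      simp only [List.map_nil]
      rw [show PySem.Set.ofList ([] : List Int) = [] from rfl]
      rw [show PySem.List.sorted ([] : List Int) (fun x => x) true = [] from rfl]
      simp only [List.isEmpty_nil, if_pos]
      rw [show ∀ d, pvLoopA d 5 max_chains [] [] = [] from fun _ => rfl]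
      exact pv_slice_nil max_chains
    · exact pv_main chains max_chains h1 h0
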